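-- pv_equiv track=rewrite | github.com/jasonbrianhall/rubikscube | cube_model.py | _get_face_cubelets
-- ===== SOURCE A (Python) =====
-- def _get_face_cubelets(face):
--     """Get the cubelets that form a face"""
--     affected = []
--     if face == 'front':
--         for x in [-1, 0, 1]:
--             for y in [-1, 0, 1]:
--                 affected.append((x, y, 1))
--     elif face == 'back':
--         for x in [-1, 0, 1]:
--             for y in [-1, 0, 1]:
--                 affected.append((x, y, -1))
--     elif face == 'left':
--         for y in [-1, 0, 1]:
--             for z in [-1, 0, 1]:
--                 affected.append((-1, y, z))
--     elif face == 'right':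
--         for y in [-1, 0, 1]:
--             for z in [-1, 0, 1]:
--                 affected.append((1, y, z))
--     elif face == 'up':
--         for x in [-1, 0, 1]:
--             for z in [-1, 0, 1]:
--                 affected.append((x, 1, z))
--     elif face == 'down':
--         for x in [-1, 0, 1]:
--             for z in [-1, 0, 1]:
--                 affected.append((x, -1, z))
--     return affected
-- ===== SOURCE B (Python) =====
-- # All 27 cubelet positions, generated once in lexicographic (x, y, z) order.
-- _ALL_POSITIONS = [(x, y, z)
--                   for x in (-1, 0, 1)
--                   for y in (-1, 0, 1)
--                   for z in (-1, 0, 1)]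
--
-- # face -> (coordinate index that is fixed on that face, its value)
-- _FACE_PLANE = {
--     'front': (2, 1), 'back': (2, -1),
--     'left': (0, -1), 'right': (0, 1),
--     'up': (1, 1), 'down': (1, -1),
-- }
--
-- def _get_face_cubelets(face):
--     """Get the cubelets that form a face"""
--     plane = _FACE_PLANE.get(face)
--     if plane is None:
--         return []
--     axis, val = plane
--     return [p for p in _ALL_POSITIONS if p[axis] == val]
-- ===== Notes on version B (the rewrite author's own statement) =====
-- stated objective: simpler
-- what changed: Instead of constructing each face's 9 tuples with six per-face double loops, B enumerates the 27 cube positions once and FILTERS them by the face's fixed-plane equation p[axis] == val; lexicographic enumeration order makes the filtered order coincide with A's per-face loop order.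
import Mathlib
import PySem

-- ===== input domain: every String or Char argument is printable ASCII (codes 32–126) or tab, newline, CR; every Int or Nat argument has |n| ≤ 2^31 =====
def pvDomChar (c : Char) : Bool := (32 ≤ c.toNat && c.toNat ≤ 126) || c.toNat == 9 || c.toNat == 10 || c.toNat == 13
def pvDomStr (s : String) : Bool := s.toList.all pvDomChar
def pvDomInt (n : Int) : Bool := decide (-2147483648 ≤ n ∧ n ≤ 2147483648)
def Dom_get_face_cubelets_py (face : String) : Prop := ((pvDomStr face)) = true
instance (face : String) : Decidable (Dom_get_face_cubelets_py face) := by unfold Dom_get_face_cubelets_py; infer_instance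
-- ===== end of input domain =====

-- B enumerates all 27 cube positions once and filters by the face's fixed-plane equation, instead of six per-face double loops (objective: simpler).
-- ===== PORT A =====
def get_face_cubelets_py (face : String) : List (Int × Int × Int) :=
  if face = "front" then
    ([-1, 0, 1] : List Int).foldl (fun acc x =>
      ([-1, 0, 1] : List Int).foldl (fun acc y => acc ++ [(x, y, (1 : Int))]) acc) []
  else if face = "back" then
    ([-1, 0, 1] : List Int).foldl (fun acc x =>
      ([-1, 0, 1] : List Int).foldl (fun acc y => acc ++ [(x, y, (-1 : Int))]) acc) []
  else if face = "left" then
    ([-1, 0, 1] : List Int).foldl (fun acc y =>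
      ([-1, 0, 1] : List Int).foldl (fun acc z => acc ++ [((-1 : Int), y, z)]) acc) []
  else if face = "right" then
    ([-1, 0, 1] : List Int).foldl (fun acc y =>
      ([-1, 0, 1] : List Int).foldl (fun acc z => acc ++ [((1 : Int), y, z)]) acc) []
  else if face = "up" then
    ([-1, 0, 1] : List Int).foldl (fun acc x =>
      ([-1, 0, 1] : List Int).foldl (fun acc z => acc ++ [(x, (1 : Int), z)]) acc) []
  else if face = "down" then
    ([-1, 0, 1] : List Int).foldl (fun acc x =>
      ([-1, 0, 1] : List Int).foldl (fun acc z => acc ++ [(x, (-1 : Int), z)]) acc) []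
  else []

-- ===== PORT B =====
-- _ALL_POSITIONS: the 27 positions in lexicographic (x, y, z) order
def allPositions : List (Int × Int × Int) :=
  ([-1, 0, 1] : List Int).flatMap (fun x =>
    ([-1, 0, 1] : List Int).flatMap (fun y =>
      ([-1, 0, 1] : List Int).map (fun z => (x, y, z))))

-- _FACE_PLANE: face ↦ (index of the fixed coordinate, its value)
def facePlane : List (String × Nat × Int) :=
  [("front", (2, 1)), ("back", (2, -1)), ("left", (0, -1)),
   ("right", (0, 1)), ("up", (1, 1)), ("down", (1, -1))]

-- p[axis] on a 3-tuple (axis is always 0, 1 or 2 here)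
def coordAt (p : Int × Int × Int) (axis : Nat) : Int :=
  match axis with
  | 0 => p.1
  | 1 => p.2.1
  | _ => p.2.2

def get_face_cubelets_py_alt (face : String) : List (Int × Int × Int) :=
  match facePlane.lookup face with
  | none => []
  | some (axis, val) => allPositions.filter (fun p => coordAt p axis == val)

-- ===== PRECONDITION & SPEC =====
def Spec_get_face_cubelets_py (face : String) (out : List (Int × Int × Int)) : Prop := out = get_face_cubelets_py_alt face
instance (face : String) (out : List (Int × Int × Int)) : Decidable (Spec_get_face_cubelets_py face out) := by unfold Spec_get_face_cubelets_py; infer_instance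

-- ===== CLAIM =====
def Claim_equal_get_face_cubelets_py : Prop := ∀ (face : String), Dom_get_face_cubelets_py face → Spec_get_face_cubelets_py face (get_face_cubelets_py face)

-- ===== LEMMAS AND PROOFS =====

-- ===== VERDICT =====
theorem get_face_cubelets_py_spec : Claim_equal_get_face_cubelets_py := by
  intro face _
  unfold Spec_get_face_cubelets_py get_face_cubelets_py get_face_cubelets_py_alt
  by_cases h1 : face = "front"; · subst h1; decide
  by_cases h2 : face = "back"; · subst h2; decide
  by_cases h3 : face = "left"; · subst h3; decide
  by_cases h4 : face = "right"; · subst h4; decide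
  by_cases h5 : face = "up"; · subst h5; decide
  by_cases h6 : face = "down"; · subst h6; decide
  simp [facePlane, List.lookup, h1, h2, h3, h4, h5, h6,
    beq_eq_false_iff_ne.mpr h1, beq_eq_false_iff_ne.mpr h2, beq_eq_false_iff_ne.mpr h3,
    beq_eq_false_iff_ne.mpr h4, beq_eq_false_iff_ne.mpr h5, beq_eq_false_iff_ne.mpr h6]
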